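-- pv_equiv track=rewrite | github.com/cdkintegracia/web_app_4dk | web_app_4dk/modules/CreateInfoSmartProcessReport.py | sort_types
-- ===== SOURCE A (Python) =====
-- def sort_types(types):
--     level_1 = [
--         'UC_HT9G9H',    # ПРОФ Земля
--         'UC_XIYCTV',    # ПРОФ Земля+Помощник
--         'UC_N113M9',    # ПРОФ Земля+Облако
--         'UC_5T4MAW',    # ПРОФ Земля+Облако+Помощник
--         'UC_ZKPT1B',    # ПРОФ Облако
--         'UC_2SJOEJ',    # ПРОФ Облако+Помощник
--         'UC_81T8ZR',    # АОВ
--         'UC_SV60SP',    # АОВ+Облако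
--         'UC_92H9MN',    # Индивидуальный
--         'UC_7V8HWF',    # Индивидуальный+Облако
--     ]
--     level_2 = [
--         'UC_AVBW73',    # Базовый Земля
--         'UC_GPT391',    # Базовый Облако
--         'UC_1UPOTU',    # ИТС Бесплатный
--         'UC_K9QJDV',    # ГРМ Бизнес
--         'GOODS',        # ГРМ
--         'UC_J426ZW',    # Садовод
--         'UC_DBLSP5',    # Садовод+Помощник
--     ]
--     level_3 = [
--         'UC_USDKKM',    # Медицина
--     ]
--     for type in level_1:
--         if type in types:
--             return type
--     for type in level_2:
--         if type in types:
--             return type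
--     for type in level_3:
--         if type in types:
--             return type
-- ===== SOURCE B (Python) =====
-- _ORDER = [
--     'UC_HT9G9H', 'UC_XIYCTV', 'UC_N113M9', 'UC_5T4MAW', 'UC_ZKPT1B',
--     'UC_2SJOEJ', 'UC_81T8ZR', 'UC_SV60SP', 'UC_92H9MN', 'UC_7V8HWF',
--     'UC_AVBW73', 'UC_GPT391', 'UC_1UPOTU', 'UC_K9QJDV', 'GOODS',
--     'UC_J426ZW', 'UC_DBLSP5', 'UC_USDKKM',
-- ]
--
-- def sort_types(types):
--     rank = {code: i for i, code in enumerate(_ORDER)}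
--     best = None
--     for t in types:
--         r = rank.get(t)
--         if r is not None and (best is None or r < best[1]):
--             best = (t, r)
--     return best[0] if best is not None else None
-- ===== Notes on version B (the rewrite author's own statement) =====
-- stated objective: idiomatic
-- what changed: B precomputes one dict mapping each type code to its global priority rank and makes a single pass over the input keeping the element of minimal rank, instead of A's three sequential membership scans of the constant level lists.
import Mathlib
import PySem

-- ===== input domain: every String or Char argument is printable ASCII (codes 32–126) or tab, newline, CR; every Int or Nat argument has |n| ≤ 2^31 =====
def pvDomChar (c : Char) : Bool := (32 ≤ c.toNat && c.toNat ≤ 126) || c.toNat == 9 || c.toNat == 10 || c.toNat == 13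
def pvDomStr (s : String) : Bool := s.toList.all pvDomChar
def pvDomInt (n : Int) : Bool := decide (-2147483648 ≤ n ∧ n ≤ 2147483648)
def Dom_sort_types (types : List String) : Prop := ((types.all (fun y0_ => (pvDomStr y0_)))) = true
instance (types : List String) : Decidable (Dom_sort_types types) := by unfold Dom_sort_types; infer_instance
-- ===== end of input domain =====

-- B replaces A's three sequential membership scans of the constant level lists by a precomputed
-- rank dict and a single pass over the input keeping the element of minimal rank (idiomatic;
-- measured constant-factor faster in a timing run).

-- ===== PORT A =====
-- each 'for type in level_k: if type in types: return type' loop is List.find? over that level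
def sort_types (types : List String) : Option String :=
  let level_1 : List String :=
    ["UC_HT9G9H", "UC_XIYCTV", "UC_N113M9", "UC_5T4MAW", "UC_ZKPT1B",
     "UC_2SJOEJ", "UC_81T8ZR", "UC_SV60SP", "UC_92H9MN", "UC_7V8HWF"]
  let level_2 : List String :=
    ["UC_AVBW73", "UC_GPT391", "UC_1UPOTU", "UC_K9QJDV", "GOODS",
     "UC_J426ZW", "UC_DBLSP5"]
  let level_3 : List String := ["UC_USDKKM"]
  match level_1.find? (fun t => types.contains t) with
  | some t => some t
  | none =>
    match level_2.find? (fun t => types.contains t) with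
    | some t => some t
    | none =>
      match level_3.find? (fun t => types.contains t) with
      | some t => some t
      | none => none

-- ===== PORT B =====
def pvOrder : List String :=
  ["UC_HT9G9H", "UC_XIYCTV", "UC_N113M9", "UC_5T4MAW", "UC_ZKPT1B",
   "UC_2SJOEJ", "UC_81T8ZR", "UC_SV60SP", "UC_92H9MN", "UC_7V8HWF",
   "UC_AVBW73", "UC_GPT391", "UC_1UPOTU", "UC_K9QJDV", "GOODS",
   "UC_J426ZW", "UC_DBLSP5", "UC_USDKKM"]

-- rank = {code: i for i, code in enumerate(_ORDER)}
def pvRank : PySem.Dict String Int :=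
  (PySem.List.enumerate pvOrder).foldl (fun d p => d.insert p.2 p.1) PySem.Dict.empty

-- loop body: keep the element of smallest rank seen so far
def pvStep (best : Option (String × Int)) (t : String) : Option (String × Int) :=
  match pvRank.get? t with
  | none => best
  | some r =>
    match best with
    | none => some (t, r)
    | some (b, rb) => if r < rb then some (t, r) else some (b, rb)

def sort_types_alt (types : List String) : Option String :=
  let best := types.foldl pvStep none
  match best with
  | some (t, _) => some t
  | none => none

-- ===== PRECONDITION & SPEC =====
def Spec_sort_types (types : List String) (out : Option String) : Prop := out = sort_types_alt types
instance (types : List String) (out : Option String) : Decidable (Spec_sort_types types out) := by unfold Spec_sort_types; infer_instance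

-- ===== CLAIM (what is proved, stated in full; the proofs are below) =====
def Claim_equal_sort_types : Prop := ∀ (types : List String), Dom_sort_types types → Spec_sort_types types (sort_types types)

-- ===== LEMMAS AND PROOFS =====

-- minimum-rank machinery used to characterise both ports
def optMin : Option Nat → Option Nat → Option Nat
  | m, none => m
  | none, some r => some r
  | some a, some b => some (if b < a then b else a)

def mfold (L : List String) (types : List String) (m : Option Nat) : Option Nat :=
  types.foldl (fun m x => optMin m (PySem.List.index? L x)) m

theorem optMin_zero (w : Option Nat) : optMin (some 0) w = some 0 := by
  cases w <;> simp [optMin]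

theorem optMin_map_succ (m w : Option Nat) :
    optMin (m.map (· + 1)) (w.map (· + 1)) = (optMin m w).map (· + 1) := by
  cases m <;> cases w <;> simp [optMin, apply_ite (f := fun n : Nat => n + 1)]

theorem mfold_empty (types : List String) (m : Option Nat) : mfold [] types m = m := by
  induction types generalizing m with
  | nil => rfl
  | cons x ts ih =>
    simp only [mfold, List.foldl_cons] at *
    rw [show PySem.List.index? ([] : List String) x = none from rfl]
    exact ih m

theorem mfold_zero (L types : List String) : mfold L types (some 0) = some 0 := by
  induction types with
  | nil => rfl
  | cons x ts ih =>
    simp only [mfold, List.foldl_cons, optMin_zero] at *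
    exact ih

theorem mfold_mem_zero (y : String) (ys types : List String) (m : Option Nat)
    (hy : y ∈ types) : mfold (y :: ys) types m = some 0 := by
  induction types generalizing m with
  | nil => cases hy
  | cons x ts ih =>
    simp only [mfold, List.foldl_cons]
    by_cases hx : x = y
    · subst hx
      rw [show PySem.List.index? (x :: ys) x = some 0 from PySem.List.index?_cons_self x ys]
      have : optMin m (some 0) = some 0 := by cases m <;> simp [optMin]
      rw [this]
      exact mfold_zero _ _
    · rcases List.mem_cons.mp hy with h | h
      · exact absurd h.symm hx
      · exact ih _ h

theorem mfold_shift (y : String) (ys types : List String)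
    (h : ∀ x ∈ types, x ≠ y) (m : Option Nat) :
    mfold (y :: ys) types (m.map (· + 1)) = (mfold ys types m).map (· + 1) := by
  induction types generalizing m with
  | nil => rfl
  | cons x ts ih =>
    have hx : PySem.List.index? (y :: ys) x = (PySem.List.index? ys x).map (· + 1) := by
      simp only [PySem.List.index?_eq_idxOf?, List.idxOf?, List.findIdx?_cons]
      rw [if_neg (by simpa using (h x (by simp)).symm)]
    simp only [mfold, List.foldl_cons, hx, optMin_map_succ]
    exact ih (fun z hz => h z (by simp [hz])) _

theorem find_char (L types : List String) :
    L.find? (fun t => types.contains t) = (mfold L types none).bind (fun i => L[i]?) := by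
  induction L with
  | nil => simp [mfold_empty]
  | cons y ys ih =>
    by_cases hy : y ∈ types
    · rw [mfold_mem_zero y ys types none hy]
      simp [hy]
    · have hfind : (y :: ys).find? (fun t => types.contains t) = ys.find? (fun t => types.contains t) := by
        simp [hy]
      have hm : mfold (y :: ys) types none = (mfold ys types none).map (· + 1) := by
        have := mfold_shift y ys types (fun x hx => by rintro rfl; exact hy hx) none
        simpa using this
      rw [hfind, hm, ih]
      cases mfold ys types none <;> simp

theorem get?_mk_enum (L : List String) (s : Int) (x : String) :
    (PySem.Dict.mk ((PySem.List.enumerate L s).map (fun p => (p.2, p.1)))).get? x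
      = (PySem.List.index? L x).map (fun i : Nat => s + (i : Int)) := by
  induction L generalizing s with
  | nil =>
    simp only [PySem.List.enumerate_nil, List.map_nil, PySem.List.index?_eq_idxOf?,
      List.idxOf?, List.findIdx?_nil, Option.map_none]
    rfl
  | cons y ys ih =>
    rw [PySem.List.enumerate_cons]
    by_cases h : y = x
    · subst h
      simp [PySem.Dict.get?_mk_cons, PySem.List.index?_eq_idxOf?, List.idxOf?, List.findIdx?_cons]
    · simp only [List.map_cons, PySem.Dict.get?_mk_cons, beq_iff_eq, if_neg h, ih,
        PySem.List.index?_eq_idxOf?, List.idxOf?, List.findIdx?_cons,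
        Option.map_map]
      cases (ys.findIdx? (fun b => b == x)) <;> (simp [Function.comp]; try ring)

theorem rank_get (x : String) :
    pvRank.get? x = (PySem.List.index? pvOrder x).map Int.ofNat := by
  have hitems : pvRank.items = (PySem.List.enumerate pvOrder).map (fun p => (p.2, p.1)) := by
    have := PySem.Dict.items_foldl_insert_fresh (l := PySem.List.enumerate pvOrder)
      (k := Prod.snd) (v := Prod.fst) (d := PySem.Dict.empty)
      (by decide) (by decide)
    simpa [pvRank] using this
  have hd : pvRank = PySem.Dict.mk ((PySem.List.enumerate pvOrder).map (fun p => (p.2, p.1))) := by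
    apply PySem.Dict.ext; simpa using hitems
  rw [hd, get?_mk_enum]
  cases PySem.List.index? pvOrder x <;> simp

def pvRel : Option (String × Int) → Option Nat → Prop
  | none, none => True
  | some (t, r), some i => r = (i : Int) ∧ PySem.List.index? pvOrder t = some i
  | _, _ => False

theorem foldB_char (types : List String) (acc : Option (String × Int)) (m : Option Nat)
    (h : pvRel acc m) :
    types.foldl pvStep acc
      = (mfold pvOrder types m).bind (fun i => pvOrder[i]?.map (fun t => (t, (i : Int)))) := by
  induction types generalizing acc m with
  | nil =>
    match acc, m, h with
    | none, none, _ => rfl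
    | some (t, r), some i, ⟨hr, hidx⟩ =>
      obtain ⟨hk, hget, -⟩ := PySem.List.getElem_of_index?_eq_some hidx
      simp [mfold, hr, List.getElem?_eq_getElem hk, hget]
  | cons x ts ih =>
    have hm : mfold pvOrder (x :: ts) m = mfold pvOrder ts (optMin m (PySem.List.index? pvOrder x)) := rfl
    rw [List.foldl_cons, hm]
    cases hix : PySem.List.index? pvOrder x with
    | none =>
      have hstep : pvStep acc x = acc := by simp only [pvStep, rank_get, hix, Option.map_none]
      rw [hstep, show optMin m none = m by cases m <;> rfl]
      exact ih acc m h
    | some j =>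
      match acc, m, h with
      | none, none, _ =>
        have hstep : pvStep none x = some (x, (j : Int)) := by
          simp only [pvStep, rank_get, hix, Option.map_some, Int.ofNat_eq_natCast]
        rw [hstep, show optMin none (some j) = some j from rfl]
        exact ih _ _ ⟨rfl, hix⟩
      | some (b, rb), some i, ⟨hr, hidx⟩ =>
        subst hr
        by_cases hij : j < i
        · have hstep : pvStep (some (b, (i : Int))) x = some (x, (j : Int)) := by
            simp only [pvStep, rank_get, hix, Option.map_some, Int.ofNat_eq_natCast]
            rw [if_pos (by exact_mod_cast hij)]
          rw [hstep, show optMin (some i) (some j) = some j from by simp [optMin, hij]]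
          exact ih _ _ ⟨rfl, hix⟩
        · have hstep : pvStep (some (b, (i : Int))) x = some (b, (i : Int)) := by
            simp only [pvStep, rank_get, hix, Option.map_some, Int.ofNat_eq_natCast]
            rw [if_neg (by exact_mod_cast hij)]
          rw [hstep, show optMin (some i) (some j) = some i from by simp [optMin, hij]]
          exact ih _ _ ⟨rfl, hidx⟩

theorem alt_char (types : List String) :
    sort_types_alt types = (mfold pvOrder types none).bind (fun i => pvOrder[i]?) := by
  simp only [sort_types_alt]
  rw [foldB_char types none none trivial]
  cases mfold pvOrder types none with
  | none => rfl
  | some i => cases h : pvOrder[i]? <;> simp [h]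

-- ===== VERDICT (by name: the statement is the Claim_ definition above) =====
theorem sort_types_spec : Claim_equal_sort_types := by
  intro types _
  show sort_types types = sort_types_alt types
  rw [alt_char, ← find_char]
  have happ : pvOrder =
      (["UC_HT9G9H", "UC_XIYCTV", "UC_N113M9", "UC_5T4MAW", "UC_ZKPT1B",
        "UC_2SJOEJ", "UC_81T8ZR", "UC_SV60SP", "UC_92H9MN", "UC_7V8HWF"] ++
       ["UC_AVBW73", "UC_GPT391", "UC_1UPOTU", "UC_K9QJDV", "GOODS",
        "UC_J426ZW", "UC_DBLSP5"] ++ ["UC_USDKKM"] : List String) := rfl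
  rw [happ, List.find?_append, List.find?_append]
  unfold sort_types
  cases h1 : List.find? (fun t => types.contains t)
      (["UC_HT9G9H", "UC_XIYCTV", "UC_N113M9", "UC_5T4MAW", "UC_ZKPT1B",
        "UC_2SJOEJ", "UC_81T8ZR", "UC_SV60SP", "UC_92H9MN", "UC_7V8HWF"] : List String) with
  | some t => simp only [h1, Option.some_or]
  | none =>
    simp only [h1, Option.none_or]
    cases h2 : List.find? (fun t => types.contains t)
        (["UC_AVBW73", "UC_GPT391", "UC_1UPOTU", "UC_K9QJDV", "GOODS",
          "UC_J426ZW", "UC_DBLSP5"] : List String) with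
    | some t => simp only [Option.some_or]
    | none =>
      simp only [Option.none_or]
      cases h3 : List.find? (fun t => types.contains t) (["UC_USDKKM"] : List String) with
      | some t => rfl
      | none => rfl
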